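-- pv_equiv track=rewrite | github.com/kimheekimhee/01-PJT-04 | 1회차/김교민/2_암호생성기.py | pass_
-- ===== SOURCE A (Python) =====
-- def pass_(p_list): # 좀 더 깔끔하게 진행하기 위해서 함수를 만든다.
--     while True:
--         for i in range(1, 6): #아래 append까지의 작업을 5번 반복한 것이 1사이클
--             n = p_list.pop(0)
--             p_list.append(n - i)
--             if p_list[-1] <= 0: #리스트의 맨 끝의 숫자가 0이하인 경우
--                 p_list[-1] = 0 # 숫자를 0으로 바꾼다.
--                 return p_list
-- ===== SOURCE B (Python) =====
-- def pass_(p_list):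
--     # Index-based simulation: subtract in place at a moving cursor instead of
--     # rotating the whole list with pop(0)/append (A's pop(0) is O(n) per step);
--     # reconstruct the rotated result once at the end.
--     # NOTE: unlike A, this does not mutate the caller's list; equivalence is
--     # about the return value only.
--     vals = list(p_list)
--     m = len(vals)
--     p = 0
--     i = 1
--     while True:
--         v = vals[p] - i
--         if v <= 0:
--             vals[p] = 0
--             return vals[p + 1:] + vals[:p + 1]
--         vals[p] = v
--         p = (p + 1) % m
--         i = i + 1 if i < 5 else 1
-- ===== Notes on version B (the rewrite author's own statement) =====
-- stated objective: faster
-- what changed: B replaces A's per-step pop(0)/append rotation of the whole list by an in-place array with a moving cursor and a cycling decrement counter, performing a single rotation of the result at the end; A's pop(0) costs O(n) per step, B's cursor step is O(1).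
import Mathlib
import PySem

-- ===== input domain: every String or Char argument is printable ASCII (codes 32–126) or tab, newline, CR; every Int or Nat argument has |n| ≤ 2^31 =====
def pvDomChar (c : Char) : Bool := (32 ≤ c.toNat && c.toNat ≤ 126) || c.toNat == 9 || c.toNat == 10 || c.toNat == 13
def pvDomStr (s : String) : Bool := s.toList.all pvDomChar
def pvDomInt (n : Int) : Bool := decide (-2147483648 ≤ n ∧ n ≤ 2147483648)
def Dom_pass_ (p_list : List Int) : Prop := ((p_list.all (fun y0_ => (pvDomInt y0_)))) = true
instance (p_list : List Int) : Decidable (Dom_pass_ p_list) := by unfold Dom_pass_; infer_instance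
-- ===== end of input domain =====

-- B replaces A's per-step pop(0)/append rotation by an in-place cursor and one final
-- rotation (objective: faster). A mutates its argument in place; B does not — the
-- equivalence proved here is about the return value only.

-- Termination measure shared by both loops: sum of the (clamped) values.
def pvMu (l : List Int) : Nat := (l.map Int.toNat).sum

-- cited by passB_go's decreasing_by: setting position p to a smaller positive value
-- strictly decreases the measure.
theorem pvMu_set_lt : ∀ (l : List Int) (p : Nat) (v : Int), p < l.length →
    1 ≤ v → v < l.getD p 0 → pvMu (l.set p v) < pvMu l := by
  intro l
  induction l with
  | nil => intro p v h; simp at h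
  | cons a t ih =>
    intro p v hp h1 hlt
    cases p with
    | zero => simp [pvMu, List.getD] at *; omega
    | succ q =>
      simp [pvMu, List.getD] at *
      have := ih q v (by omega) h1 hlt
      simp at this; omega

-- ===== PORT A =====
-- A's loop: pop the front, append (front − i) with i cycling 1..5 (c = i − 1),
-- return with the appended value replaced by 0 as soon as it is ≤ 0.
-- Python raises IndexError on []; the [] branch here is unreachable under Pre_.
def passA_go (l : List Int) (c : Nat) : List Int :=
  match l with
  | [] => []
  | n :: rest =>
    let v := n - ((c : Int) + 1)
    if h : v ≤ 0 then rest ++ [0]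
    else passA_go (rest ++ [v]) ((c + 1) % 5)
termination_by pvMu l
decreasing_by
  simp only [pvMu, List.map_append, List.map_cons, List.sum_append, List.map_nil,
    List.sum_cons, List.sum_nil]
  omega

def pass_ (p_list : List Int) : List Int := passA_go p_list 0

-- ===== PORT B =====
-- B's loop: keep the values in place, move a cursor p, subtract (c+1) at the cursor;
-- on termination write 0 there and rotate once.
def passB_go (vals : List Int) (p : Nat) (c : Nat) : List Int :=
  if h : vals.getD p 0 - ((c : Int) + 1) ≤ 0 then
    (vals.set p 0).drop (p + 1) ++ (vals.set p 0).take (p + 1)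
  else passB_go (vals.set p (vals.getD p 0 - ((c : Int) + 1)))
         ((p + 1) % vals.length) ((c + 1) % 5)
termination_by pvMu vals
decreasing_by
  refine pvMu_set_lt vals p _ ?_ (by omega) (by omega)
  by_contra hp
  rw [List.getD_eq_default _ _ (by omega)] at h
  omega

def pass__alt (p_list : List Int) : List Int := passB_go p_list 0 0

-- ===== PRECONDITION & SPEC =====
-- A pops from the front of p_list, which raises IndexError on the empty list.
def Pre_pass_ (p_list : List Int) : Prop := p_list ≠ []
instance (p_list : List Int) : Decidable (Pre_pass_ p_list) := by unfold Pre_pass_; infer_instance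
def pvWitness_pass_ : List Int := ([3, 1, 4, 1, 5])

def Spec_pass_ (p_list : List Int) (out : List Int) : Prop := out = pass__alt p_list
instance (p_list : List Int) (out : List Int) : Decidable (Spec_pass_ p_list out) := by unfold Spec_pass_; infer_instance

-- ===== CLAIM (what is proved, stated in full; the proofs are below) =====
def Claim_equal_pass_ : Prop := ∀ (p_list : List Int), Dom_pass_ p_list → Pre_pass_ p_list → Spec_pass_ p_list (pass_ p_list)

-- ===== LEMMAS AND PROOFS =====

theorem pv_drop_succ_set : ∀ (l : List Int) (i : Nat) (v : Int),
    (l.set i v).drop (i + 1) = l.drop (i + 1) := by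
  intro l
  induction l with
  | nil => intro i v; simp
  | cons a t ih =>
    intro i v
    cases i with
    | zero => simp
    | succ j => simpa using ih j v

theorem pv_take_succ_set : ∀ (l : List Int) (i : Nat) (v : Int), i < l.length →
    (l.set i v).take (i + 1) = l.take i ++ [v] := by
  intro l
  induction l with
  | nil => intro i v h; simp at h
  | cons a t ih =>
    intro i v h
    cases i with
    | zero => simp
    | succ j =>
      simp only [List.set_cons_succ, List.take_succ_cons, List.take_succ_cons,
        List.cons_append, List.cons.injEq, true_and]
      exact ih j v (by simpa using h)

-- bisimulation: A's rotating list is B's array read from the cursor on.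
theorem pv_rot_eq : ∀ (vals : List Int) (p c : Nat), p < vals.length →
    passA_go (vals.drop p ++ vals.take p) c = passB_go vals p c := by
  intro vals p c hp
  fun_induction passB_go vals p c with
  | case1 vals p c hv =>
    -- termination step
    have hget : vals.getD p 0 = vals[p] := List.getD_eq_getElem vals 0 hp
    rw [List.drop_eq_getElem_cons hp, List.cons_append, passA_go]
    simp only [← hget]
    rw [dif_pos hv, pv_drop_succ_set, pv_take_succ_set vals p 0 hp, List.append_assoc]
  | case2 vals p c hv ih =>
    have hget : vals.getD p 0 = vals[p] := List.getD_eq_getElem vals 0 hp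
    set v : Int := vals.getD p 0 - ((c : Int) + 1) with hvdef
    rw [List.drop_eq_getElem_cons hp, List.cons_append, passA_go]
    simp only [← hget, ← hvdef]
    rw [dif_neg hv]
    have hlen : ((p + 1) % vals.length) < (vals.set p v).length := by
      rw [List.length_set]; exact Nat.mod_lt _ (by omega)
    rw [← ih hlen]
    congr 1
    by_cases hend : p + 1 < vals.length
    · rw [Nat.mod_eq_of_lt hend, pv_drop_succ_set, pv_take_succ_set vals p v hp,
        List.append_assoc]
    · have hlast : p + 1 = vals.length := by omega
      have htake := pv_take_succ_set vals p v hp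
      rw [hlast] at htake
      rw [hlast, Nat.mod_self, List.drop_zero, List.take_zero, List.append_nil,
        List.drop_length, List.nil_append, ← htake,
        List.take_of_length_le (by simp)]

-- ===== VERDICT (by name: the statement is the Claim_ definition above) =====
theorem pass__spec : Claim_equal_pass_ := by
  intro p_list _ hpre
  unfold Spec_pass_ pass_ pass__alt
  have h0 : 0 < p_list.length := List.length_pos_iff.mpr hpre
  simpa using pv_rot_eq p_list 0 0 h0
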